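-- pv_equiv track=rewrite | github.com/AlexKrotov280/Text_Summarization | TextSummarization.py | ner_position
-- ===== SOURCE A (Python) =====
-- unique_tags = ['Collection', 'Season', 'Brand', 'Team', 'Color', 'O', 'Prod_t', 'SurfaceType', 'Gender', 'Strip', 'X',
--                '[CLS]', '[SEP]']
--
-- def ner_position(token_vocab, sent):
--     tag_vocab = {}
--     token_list = [0, 1, 2, 3, 4, 6, 7, 8, 9]
--
--     for word_number, word in enumerate(sent.split(), start=1):
--         for key, value in token_vocab.items():
--             if value in token_list and key.replace("##", "") in word:
--                 if unique_tags[value] not in tag_vocab: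
--                     tag_vocab[unique_tags[value]] = word_number
--     return tag_vocab
-- ===== SOURCE B (Python) =====
-- unique_tags = ['Collection', 'Season', 'Brand', 'Team', 'Color', 'O', 'Prod_t', 'SurfaceType', 'Gender', 'Strip', 'X',
--                '[CLS]', '[SEP]']
--
-- def ner_position(token_vocab, sent):
--     words = sent.split()
--     token_list = {0, 1, 2, 3, 4, 6, 7, 8, 9}
--     # one pass over the vocab: first word position of each relevant stripped key
--     cands = []
--     for key, value in token_vocab.items():
--         if value in token_list:
--             needle = key.replace("##", "")
--             pos = next((n for n, w in enumerate(words, 1) if needle in w), None)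
--             if pos is not None:
--                 cands.append((pos, unique_tags[value]))
--     # emit tags in order of their earliest position (vocab order breaking ties)
--     result = {}
--     for n in range(1, len(words) + 1):
--         for pos, tag in cands:
--             if pos == n and tag not in result:
--                 result[tag] = n
--     return result
-- ===== Notes on version B (the rewrite author's own statement) =====
-- stated objective: alternative
-- what changed: B inverts A's nesting: instead of scanning all words and re-testing every vocab entry against each word with a record-first-then-skip guard, B computes once per relevant vocab entry the first word position containing its stripped key, then buckets these (position, tag) candidates by word position to emit each tag at its earliest position in the same order as A.
import Mathlib
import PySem

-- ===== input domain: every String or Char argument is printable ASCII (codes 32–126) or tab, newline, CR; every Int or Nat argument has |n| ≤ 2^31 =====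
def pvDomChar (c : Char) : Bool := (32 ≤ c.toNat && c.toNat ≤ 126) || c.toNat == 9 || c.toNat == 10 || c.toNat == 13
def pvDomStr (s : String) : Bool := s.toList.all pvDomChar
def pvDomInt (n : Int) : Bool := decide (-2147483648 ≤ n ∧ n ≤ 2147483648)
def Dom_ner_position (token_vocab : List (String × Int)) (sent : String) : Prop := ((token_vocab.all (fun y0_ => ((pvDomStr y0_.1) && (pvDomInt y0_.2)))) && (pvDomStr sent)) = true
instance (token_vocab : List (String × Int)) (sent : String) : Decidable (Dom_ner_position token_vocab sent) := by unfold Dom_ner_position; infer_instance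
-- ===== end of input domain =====

-- B inverts A's nesting: one first-match scan per vocab entry, then candidates bucketed by word position
-- (objective: alternative decomposition, same cost class; equality of the returned dict proved below).

-- shared module-level constant (unique_tags in the Python module)
def uniqueTags : List String :=
  ["Collection", "Season", "Brand", "Team", "Color", "O", "Prod_t", "SurfaceType", "Gender", "Strip", "X",
   "[CLS]", "[SEP]"]

-- ===== PORT A =====
def ner_position (token_vocab : List (String × Int)) (sent : String) : List (String × Int) :=
  let token_list : List Int := [0, 1, 2, 3, 4, 6, 7, 8, 9]
  ((PySem.List.enumerate (PySem.Str.split₀ sent) 1).foldl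
    (fun tag_vocab nw =>
      (PySem.Dict.ofList token_vocab).items.foldl
        (fun tag_vocab kv =>
          if token_list.contains kv.2 && PySem.Str.isIn (PySem.Str.replace kv.1 "##" "") nw.2 then
            -- guard guarantees kv.2 ∈ [0,9], so unique_tags[kv.2] never raises; getD "" is unreachable
            if tag_vocab.contains ((PySem.List.pyGet? uniqueTags kv.2).getD "") then tag_vocab
            else tag_vocab.insert ((PySem.List.pyGet? uniqueTags kv.2).getD "") nw.1
          else tag_vocab)
        tag_vocab)
    PySem.Dict.empty).items

-- ===== PORT B =====
-- next((n for n, w in enumerate(words, 1) if needle in w), None)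
def firstHitAux (needle : String) : List (Int × String) → Option Int
  | [] => none
  | nw :: rest => if PySem.Str.isIn needle nw.2 then some nw.1 else firstHitAux needle rest

def ner_position_alt (token_vocab : List (String × Int)) (sent : String) : List (String × Int) :=
  let words := PySem.Str.split₀ sent
  let token_list : List Int := [0, 1, 2, 3, 4, 6, 7, 8, 9]
  let cands : List (Int × String) :=
    (PySem.Dict.ofList token_vocab).items.foldl
      (fun acc kv =>
        if token_list.contains kv.2 then
          match firstHitAux (PySem.Str.replace kv.1 "##" "") (PySem.List.enumerate words 1) with
          | some pos => acc ++ [(pos, (PySem.List.pyGet? uniqueTags kv.2).getD "")]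
          | none => acc
        else acc) []
  ((PySem.List.pyRange 1 ((words.length : Int) + 1) 1).foldl
    (fun result n =>
      cands.foldl
        (fun result c =>
          if c.1 == n && !(result.contains c.2) then result.insert c.2 n else result)
        result)
    PySem.Dict.empty).items

-- ===== PRECONDITION & SPEC =====
def Spec_ner_position (token_vocab : List (String × Int)) (sent : String) (out : List (String × Int)) : Prop := out = ner_position_alt token_vocab sent
instance (token_vocab : List (String × Int)) (sent : String) (out : List (String × Int)) : Decidable (Spec_ner_position token_vocab sent out) := by unfold Spec_ner_position; infer_instance

-- ===== CLAIM (what is proved, stated in full; the proofs are below) =====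
def Claim_equal_ner_position : Prop := ∀ (token_vocab : List (String × Int)) (sent : String), Dom_ner_position token_vocab sent → Spec_ner_position token_vocab sent (ner_position token_vocab sent)

-- ===== LEMMAS AND PROOFS =====

-- the per-entry candidate (ok/nd/tg kept abstract in the lemmas)
def candF (ok : String × Int → Bool) (nd tg : String × Int → String) (E : List (Int × String))
    (kv : String × Int) : Option (Int × String) :=
  if ok kv then (firstHitAux (nd kv) E).map (fun p => (p, tg kv)) else none

-- the guarded first-insert step both programs ultimately perform, on a candidate (pos, tag)
def gstepP (d : PySem.Dict String Int) (c : Int × String) : PySem.Dict String Int :=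
  if d.contains c.2 then d else d.insert c.2 c.1

theorem cands_eq_filterMap (ok : String × Int → Bool) (nd tg : String × Int → String)
    (E : List (Int × String)) :
    ∀ (l : List (String × Int)) (acc : List (Int × String)),
      l.foldl (fun acc kv =>
          if ok kv then
            match firstHitAux (nd kv) E with
            | some pos => acc ++ [(pos, tg kv)]
            | none => acc
          else acc) acc
        = acc ++ l.filterMap (candF ok nd tg E) := by
  intro l
  induction l with
  | nil => intro acc; simp
  | cons kv rest ih =>
    intro acc
    simp only [List.foldl_cons, List.filterMap_cons, candF]
    by_cases h : ok kv = true
    · simp only [h, if_pos]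
      cases hF : firstHitAux (nd kv) E with
      | none => simp [ih, candF]
      | some p => simp [ih, candF]
    · simp only [Bool.not_eq_true] at h
      simp [h, ih, candF]

theorem firstHitAux_some (needle : String) :
    ∀ (ws : List String) (s p : Int),
      firstHitAux needle (PySem.List.enumerate ws s) = some p →
      ∃ (j : Nat) (h : j < ws.length), p = s + j ∧ PySem.Str.isIn needle ws[j] = true := by
  intro ws
  induction ws with
  | nil => intro s p h; simp [PySem.List.enumerate_nil, firstHitAux] at h
  | cons w rest ih =>
    intro s p h
    rw [PySem.List.enumerate_cons] at h
    simp only [firstHitAux] at h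
    by_cases hw : PySem.Str.isIn needle w = true
    · rw [if_pos hw] at h
      injection h with h
      exact ⟨0, by simp, by omega, by simpa using hw⟩
    · rw [if_neg hw] at h
      obtain ⟨j, hj, hp, hin⟩ := ih (s + 1) p h
      exact ⟨j + 1, by simpa using hj, by push_cast; omega, by simpa using hin⟩

theorem firstHitAux_le (needle : String) :
    ∀ (ws : List String) (s : Int) (j : Nat) (h : j < ws.length),
      PySem.Str.isIn needle ws[j] = true →
      ∃ p, firstHitAux needle (PySem.List.enumerate ws s) = some p ∧ p ≤ s + j := by
  intro ws
  induction ws with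
  | nil => intro s j h; simp at h
  | cons w rest ih =>
    intro s j h hin
    rw [PySem.List.enumerate_cons]
    simp only [firstHitAux]
    by_cases hw : PySem.Str.isIn needle w = true
    · exact ⟨s, by rw [if_pos hw], by omega⟩
    · rw [if_neg hw]
      cases j with
      | zero => exact absurd (by simpa using hin) hw
      | succ j' =>
        obtain ⟨p, hp, hle⟩ := ih (s + 1) j' (by simpa using h) (by simpa using hin)
        exact ⟨p, hp, by push_cast at hle ⊢; omega⟩

theorem filter_filterMap_candF (ok : String × Int → Bool) (nd tg : String × Int → String)
    (E : List (Int × String)) (n : Int) :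
    ∀ (l : List (String × Int)),
      (l.filterMap (candF ok nd tg E)).filter (fun c => c.1 == n)
        = (l.filter (fun kv => ok kv && (firstHitAux (nd kv) E == some n))).map (fun kv => (n, tg kv)) := by
  intro l
  induction l with
  | nil => simp
  | cons kv rest ih =>
    simp only [candF] at ih ⊢
    simp only [List.filterMap_cons, List.filter_cons]
    cases hk : ok kv with
    | false => simpa [hk] using ih
    | true =>
      cases hF : firstHitAux (nd kv) E with
      | none => simpa [hk, hF] using ih
      | some p =>
        by_cases hp : p = n
        · subst hp
          simp [ih]
        · simp [hp, ih]

theorem aInner_eq_filter (ok : String × Int → Bool) (nd tg : String × Int → String)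
    (E : List (Int × String)) (n : Int) (w : String)
    (hw1 : ∀ kv : String × Int, ok kv = true → firstHitAux (nd kv) E = some n →
             PySem.Str.isIn (nd kv) w = true) :
    ∀ (l : List (String × Int)) (d : PySem.Dict String Int),
      (∀ kv ∈ l, ok kv = true → PySem.Str.isIn (nd kv) w = true →
          firstHitAux (nd kv) E = some n ∨ d.contains (tg kv) = true) →
      l.foldl (fun d kv =>
          if ok kv && PySem.Str.isIn (nd kv) w then
            if d.contains (tg kv) then d else d.insert (tg kv) n
          else d) d
        = (l.filter (fun kv => ok kv && (firstHitAux (nd kv) E == some n))).foldl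
            (fun d kv => if d.contains (tg kv) then d else d.insert (tg kv) n) d := by
  intro l
  induction l with
  | nil => intro d _; simp
  | cons kv rest ih =>
    intro d hinv
    simp only [List.foldl_cons, List.filter_cons]
    have hmono : ∀ (x : String),
        d.contains x = true →
        ((if d.contains (tg kv) then d else d.insert (tg kv) n).contains x) = true := by
      intro x hx
      split
      · exact hx
      · simp [PySem.Dict.contains_insert, hx]
    cases hk : ok kv with
    | false =>
      simp only [Bool.false_and, Bool.false_eq_true, if_false]
      exact ih d (fun kv' h' => hinv kv' (List.mem_cons_of_mem _ h'))
    | true =>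
      cases hin : PySem.Str.isIn (nd kv) w with
      | false =>
        rw [if_neg (by simp)]
        have hF : (firstHitAux (nd kv) E == some n) = false := by
          cases hF' : firstHitAux (nd kv) E == some n
          · rfl
          · have h2 := hw1 kv hk (by simpa using hF')
            rw [h2] at hin
            cases hin
        rw [if_neg (by simp [hF])]
        exact ih d (fun kv' h' => hinv kv' (List.mem_cons_of_mem _ h'))
      | true =>
        rw [if_pos (by simp)]
        rcases hinv kv (List.mem_cons_self) hk hin with hF | hc
        · have hcnd : (true && (firstHitAux (nd kv) E == some n)) = true := by simp [hF]
          rw [if_pos hcnd]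
          simp only [List.foldl_cons]
          refine ih _ (fun kv' h' hok' hin' => ?_)
          rcases hinv kv' (List.mem_cons_of_mem _ h') hok' hin' with h | h
          · exact Or.inl h
          · exact Or.inr (hmono _ h)
        · rw [if_pos hc]
          cases hF' : (firstHitAux (nd kv) E == some n) with
          | true =>
            rw [if_pos (show (true && true) = true from rfl)]
            simp only [List.foldl_cons]
            rw [if_pos hc]
            exact ih d (fun kv' h' => hinv kv' (List.mem_cons_of_mem _ h'))
          | false =>
            rw [if_neg (show ¬ (true && false) = true by decide)]
            exact ih d (fun kv' h' => hinv kv' (List.mem_cons_of_mem _ h'))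



theorem contains_foldl_mono {α : Type} (f : PySem.Dict String Int → α → PySem.Dict String Int)
    (x : String)
    (hf : ∀ d y, d.contains x = true → (f d y).contains x = true) :
    ∀ (l : List α) (d : PySem.Dict String Int),
      d.contains x = true → (l.foldl f d).contains x = true := by
  intro l
  induction l with
  | nil => intro d h; simpa using h
  | cons y rest ih => intro d h; exact ih (f d y) (hf d y h)

theorem contains_foldl_bstep (n : Int) (c : Int × String) :
    ∀ (C : List (Int × String)) (d : PySem.Dict String Int),
      c ∈ C → c.1 = n →
      ((C.foldl (fun d c => if c.1 == n && !(d.contains c.2) then d.insert c.2 n else d) d).contains c.2) = true := by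
  intro C
  induction C with
  | nil => intro d h; simp at h
  | cons c' rest ih =>
    intro d hmem h1
    have hmono : ∀ (d : PySem.Dict String Int) (y : Int × String), d.contains c.2 = true →
        ((if y.1 == n && !(d.contains y.2) then d.insert y.2 n else d).contains c.2) = true := by
      intro d y hd
      split
      · simp [PySem.Dict.contains_insert, hd]
      · exact hd
    rcases List.mem_cons.mp hmem with hc | hc
    · subst hc
      simp only [List.foldl_cons]
      apply contains_foldl_mono _ _ hmono
      by_cases hd : d.contains c.2 = true
      · split
        · simp
        · exact hd
      · simp only [Bool.not_eq_true] at hd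
        rw [if_pos (by simp [h1, hd])]
        simp
    · exact ih _ hc h1

theorem bInner_eq_gstep (n : Int) :
    ∀ (C : List (Int × String)) (d : PySem.Dict String Int),
      C.foldl (fun d c => if c.1 == n && !(d.contains c.2) then d.insert c.2 n else d) d
        = (C.filter (fun c => c.1 == n)).foldl gstepP d := by
  intro C
  induction C with
  | nil => intro d; simp
  | cons c rest ih =>
    intro d
    cases hb : (c.1 == n) with
    | false =>
      simp only [List.foldl_cons, List.filter_cons, hb, Bool.false_and, Bool.false_eq_true, if_false]
      exact ih d
    | true =>
      have h1 : c.1 = n := by simpa using hb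
      have hstep : (if (true && !(d.contains c.2)) = true then d.insert c.2 n else d) = gstepP d c := by
        unfold gstepP
        by_cases hd : d.contains c.2 = true
        · rw [if_neg (by simp [hd]), if_pos hd]
        · simp only [Bool.not_eq_true] at hd
          rw [if_pos (by simp [hd]), if_neg (by simp [hd]), h1]
      simp only [List.foldl_cons, List.filter_cons, hb, if_true]
      rw [hstep]
      exact ih _


theorem inner_eq (ok : String × Int → Bool) (nd tg : String × Int → String)
    (E : List (Int × String)) (n : Int) (w : String) (l : List (String × Int))
    (d : PySem.Dict String Int)
    (hw1 : ∀ kv : String × Int, ok kv = true → firstHitAux (nd kv) E = some n →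
             PySem.Str.isIn (nd kv) w = true)
    (hinv : ∀ kv ∈ l, ok kv = true → PySem.Str.isIn (nd kv) w = true →
          firstHitAux (nd kv) E = some n ∨ d.contains (tg kv) = true) :
    l.foldl (fun d kv =>
        if ok kv && PySem.Str.isIn (nd kv) w then
          if d.contains (tg kv) then d else d.insert (tg kv) n
        else d) d
      = (l.filterMap (candF ok nd tg E)).foldl
          (fun d c => if c.1 == n && !(d.contains c.2) then d.insert c.2 n else d) d := by
  rw [bInner_eq_gstep, filter_filterMap_candF, List.foldl_map]
  exact aInner_eq_filter ok nd tg E n w hw1 l d hinv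

theorem outer_eq (ok : String × Int → Bool) (nd tg : String × Int → String)
    (W : List String) (l : List (String × Int)) :
    ∀ (ws : List String) (s : Nat) (d : PySem.Dict String Int),
      W.drop s = ws →
      (∀ c ∈ l.filterMap (candF ok nd tg (PySem.List.enumerate W 1)), c.1 < (s : Int) + 1 →
          d.contains c.2 = true) →
      (PySem.List.enumerate ws ((s : Int) + 1)).foldl
          (fun d nw => l.foldl (fun d kv =>
              if ok kv && PySem.Str.isIn (nd kv) nw.2 then
                if d.contains (tg kv) then d else d.insert (tg kv) nw.1
              else d) d) d
        = (PySem.List.pyRange ((s : Int) + 1) ((W.length : Int) + 1) 1).foldl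
            (fun d n => (l.filterMap (candF ok nd tg (PySem.List.enumerate W 1))).foldl
                (fun d c => if c.1 == n && !(d.contains c.2) then d.insert c.2 n else d) d) d := by
  intro ws
  induction ws with
  | nil =>
    intro s d hdrop hinv
    have hlen : W.length ≤ s := by
      have := congrArg List.length hdrop; simp at this; omega
    rw [PySem.List.enumerate_nil, PySem.List.pyRange_one_eq_nil (by omega)]
    rfl
  | cons w rest ih =>
    intro s d hdrop hinv
    have hs : s < W.length := by
      have := congrArg List.length hdrop; simp at this; omega
    have hW : W[s]'hs = w := by
      have h0 : (W.drop s)[0]? = some w := by rw [hdrop]; rfl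
      rw [List.getElem?_drop] at h0
      simp only [Nat.add_zero] at h0
      exact (List.getElem_eq_iff hs).mpr h0
    have hrest : W.drop (s + 1) = rest := by
      have := congrArg List.tail hdrop
      simpa [List.tail_drop] using this
    rw [PySem.List.enumerate_cons, PySem.List.pyRange_one_cons (by omega)]
    simp only [List.foldl_cons]
    have hw1 : ∀ kv : String × Int, ok kv = true →
        firstHitAux (nd kv) (PySem.List.enumerate W 1) = some ((s : Int) + 1) →
        PySem.Str.isIn (nd kv) w = true := by
      intro kv _ hF
      obtain ⟨j, hj, hpj, hin⟩ := firstHitAux_some (nd kv) W 1 _ hF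
      have : j = s := by omega
      subst this
      rwa [hW] at hin
    have hinv' : ∀ kv ∈ l, ok kv = true → PySem.Str.isIn (nd kv) w = true →
        firstHitAux (nd kv) (PySem.List.enumerate W 1) = some ((s : Int) + 1) ∨
          d.contains (tg kv) = true := by
      intro kv hkv hok hin
      obtain ⟨p, hp, hple⟩ := firstHitAux_le (nd kv) W 1 s hs (by rwa [hW])
      by_cases hpn : p = (s : Int) + 1
      · exact Or.inl (by rwa [hpn] at hp)
      · refine Or.inr (hinv (p, tg kv) ?_ (by simp; omega))
        exact List.mem_filterMap.mpr ⟨kv, hkv, by simp [candF, hok, hp]⟩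
    rw [inner_eq ok nd tg (PySem.List.enumerate W 1) ((s : Int) + 1) w l d hw1 hinv']
    set C := l.filterMap (candF ok nd tg (PySem.List.enumerate W 1)) with hC
    set d' := C.foldl
        (fun d c => if c.1 == (s : Int) + 1 && !(d.contains c.2) then d.insert c.2 ((s : Int) + 1) else d) d with hd'
    have hinv'' : ∀ c ∈ C, c.1 < ((s + 1 : Nat) : Int) + 1 → d'.contains c.2 = true := by
      intro c hc hlt
      by_cases hcs : c.1 = (s : Int) + 1
      · exact contains_foldl_bstep ((s : Int) + 1) c C d hc hcs
      · have : c.1 < (s : Int) + 1 := by push_cast at hlt; omega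
        refine contains_foldl_mono _ _ ?_ C d (hinv c hc this)
        intro d y hy
        split
        · simp [PySem.Dict.contains_insert, hy]
        · exact hy
    have hcast : ((s : Int) + 1) + 1 = ((s + 1 : Nat) : Int) + 1 := by push_cast; ring
    rw [hcast]
    exact ih (s + 1) d' hrest hinv''

-- ===== VERDICT (by name: the statement is the Claim_ definition above) =====
theorem ner_position_spec : Claim_equal_ner_position := by
  intro token_vocab sent _
  unfold Spec_ner_position
  simp only [ner_position, ner_position_alt]
  rw [cands_eq_filterMap (fun kv => ([0, 1, 2, 3, 4, 6, 7, 8, 9] : List Int).contains kv.2)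
        (fun kv => PySem.Str.replace kv.1 "##" "")
        (fun kv => (PySem.List.pyGet? uniqueTags kv.2).getD "")
        (PySem.List.enumerate (PySem.Str.split₀ sent) 1)
        (PySem.Dict.ofList token_vocab).items []]
  rw [List.nil_append]
  have hinv0 : ∀ c ∈ (PySem.Dict.ofList token_vocab).items.filterMap
      (candF (fun kv => ([0, 1, 2, 3, 4, 6, 7, 8, 9] : List Int).contains kv.2)
        (fun kv => PySem.Str.replace kv.1 "##" "")
        (fun kv => (PySem.List.pyGet? uniqueTags kv.2).getD "")
        (PySem.List.enumerate (PySem.Str.split₀ sent) 1)),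
      c.1 < ((0 : Nat) : Int) + 1 → (PySem.Dict.empty (κ := String) (ν := Int)).contains c.2 = true := by
    intro c hc hlt
    obtain ⟨kv, _, hkv⟩ := List.mem_filterMap.mp hc
    unfold candF at hkv
    rcases hF : firstHitAux (PySem.Str.replace kv.1 "##" "")
        (PySem.List.enumerate (PySem.Str.split₀ sent) 1) with _ | p
    · rw [hF] at hkv
      simp at hkv
    · obtain ⟨j, hj, hpj, _⟩ := firstHitAux_some _ _ 1 p hF
      rw [hF] at hkv
      have hc1 : c.1 = p := by
        by_cases hok : ([0, 1, 2, 3, 4, 6, 7, 8, 9] : List Int).contains kv.2 = true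
        · rw [if_pos hok] at hkv
          simp only [Option.map_some] at hkv
          injection hkv with hkv
          rw [← hkv]
        · rw [if_neg hok] at hkv; cases hkv
      simp at hlt
      omega
  have h := outer_eq (fun kv => ([0, 1, 2, 3, 4, 6, 7, 8, 9] : List Int).contains kv.2)
      (fun kv => PySem.Str.replace kv.1 "##" "")
      (fun kv => (PySem.List.pyGet? uniqueTags kv.2).getD "")
      (PySem.Str.split₀ sent) (PySem.Dict.ofList token_vocab).items
      (PySem.Str.split₀ sent) 0 PySem.Dict.empty (by simp) hinv0
  simp only [Nat.cast_zero, zero_add] at h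
  rw [h]
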